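-- pv_equiv track=rewrite | github.com/pypi-data/pypi-mirror-203 | packages/uic/uic-0.0.1-py3-none-any.whl/uic/__init__.py | parse_wagonnumber_pattern
-- ===== SOURCE A (Python) =====
-- def parse_wagonnumber_pattern(wagonnumber_pattern):
--     """Parse given wagon number pattern of the form "xxxxxxx-x" where each of
--     the digits "x" may also be replaced by a questionmark "?". The number of
--     digits before the dash "-" is arbitrary.
--
--     Example usage:
--
--     >>> parse_wagonnumber_pattern('120 002-1')
--     (7, [1, 2, 0, 0, 0, 2, 1], [0, 1, 2, 3, 4, 5, 6], [])
--     >>> parse_wagonnumber_pattern('120 002-?')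
--     (7, [1, 2, 0, 0, 0, 2], [0, 1, 2, 3, 4, 5], [6])
--     >>> parse_wagonnumber_pattern('120 00?-?')
--     (7, [1, 2, 0, 0, 0], [0, 1, 2, 3, 4], [5, 6])"""
--     wagonnumber_pattern = str(wagonnumber_pattern)
--     if wagonnumber_pattern.count('-') != 1:
--         raise ValueError('invalid wagon number pattern')
--     left, right = wagonnumber_pattern.split('-')
--     if len(right) != 1:
--         raise ValueError('invalid wagon number pattern')
--     count = 0
--     digits = []
--     inds = []
--     missinds = []
--     ind = 0
--     for char in wagonnumber_pattern:
--         if char in '1234567890':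
--             count += 1
--             digits.append(int(char))
--             inds.append(ind)
--         elif char == '?':
--             count += 1
--             missinds.append(ind)
--         elif char in ' -':
--             continue
--         else:
--             raise ValueError('invalid wagon number pattern')
--         ind += 1
--     return count, digits, inds, missinds
-- ===== SOURCE B (Python) =====
-- def parse_wagonnumber_pattern(wagonnumber_pattern):
--     """Parse a wagon number pattern "xxx...x-x" (digits or question-mark wildcards,
--     spaces allowed as grouping) into (count, digits, digit positions,
--     wildcard positions)."""
--     s = str(wagonnumber_pattern)
--     if s.count('-') != 1:
--         raise ValueError('invalid wagon number pattern')
--     left, right = s.split('-')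
--     if len(right) != 1:
--         raise ValueError('invalid wagon number pattern')
--     cleaned = s.replace(' ', '').replace('-', '')
--     if not all(c == '?' or c.isdigit() for c in cleaned):
--         raise ValueError('invalid wagon number pattern')
--     digits = [int(c) for c in cleaned if c != '?']
--     inds = [i for i, c in enumerate(cleaned) if c != '?']
--     missinds = [i for i, c in enumerate(cleaned) if c == '?']
--     return len(cleaned), digits, inds, missinds
-- ===== Notes on version B (the rewrite author's own statement) =====
-- stated objective: simpler
-- what changed: Replaces A's single stateful loop (manual separator-skipping index counter and four mutated accumulators) with a staged pipeline: strip separators once, validate the cleaned string, then build each result list by an independent comprehension over the enumerated cleaned string; Pre_ excludes exactly the inputs on which A raises ValueError (malformed dash structure or an invalid character).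
import Mathlib
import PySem

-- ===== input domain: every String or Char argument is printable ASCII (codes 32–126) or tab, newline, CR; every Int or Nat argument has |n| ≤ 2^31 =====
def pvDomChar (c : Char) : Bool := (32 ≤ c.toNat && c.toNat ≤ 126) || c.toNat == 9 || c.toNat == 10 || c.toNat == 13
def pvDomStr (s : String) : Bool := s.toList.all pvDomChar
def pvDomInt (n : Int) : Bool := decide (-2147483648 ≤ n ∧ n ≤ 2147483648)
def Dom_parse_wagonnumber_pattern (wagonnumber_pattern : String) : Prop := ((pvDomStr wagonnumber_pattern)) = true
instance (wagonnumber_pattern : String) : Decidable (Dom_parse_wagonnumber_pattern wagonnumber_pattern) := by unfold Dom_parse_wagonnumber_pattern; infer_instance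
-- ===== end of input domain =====

-- B replaces A's single stateful loop by strip-separators + validate + three independent
-- comprehensions over the enumerated cleaned string (objective: simpler decomposition).
-- Equivalence of return values is proved on Pre_ (the inputs where A returns normally).

-- ===== PORT A =====
-- int(char) for a digit char (exact on '0'..'9')
def pvDigitVal (c : Char) : Int := (c.toNat : Int) - 48

-- A's for-loop over the characters, with its five pieces of mutable state;
-- 'none' is the ValueError of the final else branch (excluded by Pre_).
def pvA_loop : List Char → Int → List Int → List Int → List Int → Int →
    Option (Int × List Int × List Int × List Int)
  | [], count, digits, inds, missinds, _ => some (count, digits, inds, missinds)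
  | c :: rest, count, digits, inds, missinds, ind =>
    if c ∈ ['1','2','3','4','5','6','7','8','9','0'] then
      pvA_loop rest (count + 1) (digits ++ [pvDigitVal c]) (inds ++ [ind]) missinds (ind + 1)
    else if c = '?' then
      pvA_loop rest (count + 1) digits inds (missinds ++ [ind]) (ind + 1)
    else if c ∈ [' ', '-'] then
      pvA_loop rest count digits inds missinds ind
    else none

-- s.count('-') ported as list count (exact for a 1-char needle); s.split('-') with
-- exactly one dash ported as takeWhile/drop (exact under that guard).
def parse_wagonnumber_pattern (wagonnumber_pattern : String) : Int × List Int × List Int × List Int :=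
  let cs := wagonnumber_pattern.toList
  if cs.count '-' ≠ 1 then (0, [], [], [])        -- ValueError (outside Pre_)
  else
    let left := cs.takeWhile (· ≠ '-')
    let right := cs.drop (left.length + 1)
    if right.length ≠ 1 then (0, [], [], [])      -- ValueError (outside Pre_)
    else
      match pvA_loop cs 0 [] [] [] 0 with
      | some r => r
      | none => (0, [], [], [])                   -- ValueError (outside Pre_)

-- ===== PORT B =====
def parse_wagonnumber_pattern_alt (wagonnumber_pattern : String) : Int × List Int × List Int × List Int :=
  let cs := wagonnumber_pattern.toList
  if cs.count '-' ≠ 1 then (0, [], [], [])        -- ValueError (outside Pre_)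
  else
    let left := cs.takeWhile (· ≠ '-')
    let right := cs.drop (left.length + 1)
    if right.length ≠ 1 then (0, [], [], [])      -- ValueError (outside Pre_)
    else
      -- cleaned = s.replace(' ','').replace('-','')
      let cleaned := (cs.filter (· ≠ ' ')).filter (· ≠ '-')
      if ¬ (cleaned.all fun c => c = '?' || c.isDigit) then (0, [], [], [])  -- ValueError (outside Pre_)
      else
        let en := PySem.List.enumerate cleaned
        ((cleaned.length : Int),
         (cleaned.filter (· ≠ '?')).map pvDigitVal,
         (en.filter fun p => p.2 ≠ '?').map (·.1),
         (en.filter fun p => p.2 = '?').map (·.1))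

-- ===== PRECONDITION & SPEC =====
-- Pre_ admits exactly the inputs on which Python A returns normally: exactly one dash,
-- exactly one character after it, and every character a digit, question mark, space or dash.
def Pre_parse_wagonnumber_pattern (wagonnumber_pattern : String) : Prop :=
  let cs := wagonnumber_pattern.toList
  cs.count '-' = 1 ∧
  (cs.drop ((cs.takeWhile (· ≠ '-')).length + 1)).length = 1 ∧
  cs.all (fun c => ['1','2','3','4','5','6','7','8','9','0','?',' ','-'].contains c) = true
instance (wagonnumber_pattern : String) : Decidable (Pre_parse_wagonnumber_pattern wagonnumber_pattern) := by
  unfold Pre_parse_wagonnumber_pattern; infer_instance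

def pvWitness_parse_wagonnumber_pattern : String := "1-2"

def Spec_parse_wagonnumber_pattern (wagonnumber_pattern : String) (out : Int × List Int × List Int × List Int) : Prop :=
  out = parse_wagonnumber_pattern_alt wagonnumber_pattern
instance (wagonnumber_pattern : String) (out : Int × List Int × List Int × List Int) : Decidable (Spec_parse_wagonnumber_pattern wagonnumber_pattern out) := by
  unfold Spec_parse_wagonnumber_pattern; infer_instance

-- ===== CLAIM =====
def Claim_equal_parse_wagonnumber_pattern : Prop :=
  ∀ (wagonnumber_pattern : String), Dom_parse_wagonnumber_pattern wagonnumber_pattern →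
    Pre_parse_wagonnumber_pattern wagonnumber_pattern →
    Spec_parse_wagonnumber_pattern wagonnumber_pattern (parse_wagonnumber_pattern wagonnumber_pattern)

-- ===== LEMMAS AND PROOFS =====

-- "cleaned" of A's traversal: the significant (non-space, non-dash) characters.
def pvClean (cs : List Char) : List Char := (cs.filter (· ≠ ' ')).filter (· ≠ '-')

theorem pvA_loop_characterization (cs : List Char)
    (hall : ∀ c ∈ cs, c ∈ ['1','2','3','4','5','6','7','8','9','0','?',' ','-']) :
    ∀ (count : Int) (digits inds missinds : List Int) (ind : Int),
    pvA_loop cs count digits inds missinds ind =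
      some (count + ((pvClean cs).length : Int),
            digits ++ ((pvClean cs).filter (· ≠ '?')).map pvDigitVal,
            inds ++ ((PySem.List.enumerate (pvClean cs) ind).filter fun p => p.2 ≠ '?').map (·.1),
            missinds ++ ((PySem.List.enumerate (pvClean cs) ind).filter fun p => p.2 = '?').map (·.1)) := by
  induction cs with
  | nil => intro count digits inds missinds ind
           simp [pvA_loop, pvClean, PySem.List.enumerate_nil]
  | cons c rest ih =>
    intro count digits inds missinds ind
    have hc : c ∈ ['1','2','3','4','5','6','7','8','9','0','?',' ','-'] := hall c (by simp)
    have hrest : ∀ x ∈ rest, x ∈ ['1','2','3','4','5','6','7','8','9','0','?',' ','-'] :=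
      fun x hx => hall x (by simp [hx])
    fin_cases hc <;>
      simp [pvA_loop, pvClean, ih hrest, PySem.List.enumerate_cons] <;> omega

-- ===== VERDICT =====
theorem parse_wagonnumber_pattern_spec : Claim_equal_parse_wagonnumber_pattern := by
  intro s _ hpre
  obtain ⟨h1, h2, h3b⟩ := hpre
  have h3 : ∀ c ∈ s.toList, c ∈ ['1','2','3','4','5','6','7','8','9','0','?',' ','-'] := by
    simpa [List.all_eq_true] using h3b
  unfold Spec_parse_wagonnumber_pattern parse_wagonnumber_pattern parse_wagonnumber_pattern_alt
  have hloop := pvA_loop_characterization s.toList h3 0 [] [] [] 0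
  have hnoex : ¬ ∃ x ∈ s.toList, (¬x = '-' ∧ ¬x = ' ') ∧ ¬x = '?' ∧ x.isDigit = false := by
    rintro ⟨x, hx, ⟨hd, hs⟩, hq, hdig⟩
    have := h3 x hx
    fin_cases this <;> simp_all
  simp [h1, hloop, pvClean, hnoex]
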